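-- pv_equiv track=rewrite | github.com/saaim12/DSA-Python | Dynamic Programming/Dp On Grids/Geeks_training_OR_Ninja_training_2D.py | geek_training_memo
-- ===== SOURCE A (Python) =====
-- def geek_training_memo(arr):
--     """
--     Recursive solution with memoization
--     """
--     total_days = len(arr)
--     total_tasks = len(arr[0])
--     memo = {}
--
--     def check(day, last):
--         if day == 0:
--             maxi = 0
--             for i in range(total_tasks):
--                 if i != last:
--                     maxi = max(maxi, arr[0][i])
--             return maxi
--
--         if (day, last) in memo:
--             return memo[(day, last)]
--
--         maxi = 0
--         for i in range(total_tasks):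
--             if i != last:
--                 points = arr[day][i] + check(day - 1, i)
--                 maxi = max(maxi, points)
--
--         memo[(day, last)] = maxi
--         return maxi
--
--     return check(total_days - 1, total_tasks)
-- ===== SOURCE B (Python) =====
-- def geek_training_memo(arr):
--     """
--     Forward DP keeping the best and second-best running totals per day,
--     so excluding one task index costs O(1) instead of an inner scan.
--     """
--     total_tasks = len(arr[0])
--     p = list(arr[0])
--     for row in arr[1:]:
--         best = second = 0          # totals are clamped at 0, like the recursion's maxi = 0
--         best_i = -1
--         for i, v in enumerate(p):
--             if v > best:
--                 second, best, best_i = best, v, i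
--             elif v > second:
--                 second = v
--         p = [row[i] + (second if i == best_i else best) for i in range(total_tasks)]
--     ans = 0
--     for v in p:
--         ans = max(ans, v)
--     return ans
-- ===== Notes on version B (the rewrite author's own statement) =====
-- stated objective: faster
-- what changed: Replaces the top-down memoized recursion over (day,last) with a forward DP that keeps only the per-day totals vector plus its best/second-best values, so excluding one task index costs O(1) instead of an inner scan over all tasks.
-- outside the precondition, e.g. on geek_training_memo([[5], [], [3]]): A returns 3, B raises IndexError
import Mathlib
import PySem

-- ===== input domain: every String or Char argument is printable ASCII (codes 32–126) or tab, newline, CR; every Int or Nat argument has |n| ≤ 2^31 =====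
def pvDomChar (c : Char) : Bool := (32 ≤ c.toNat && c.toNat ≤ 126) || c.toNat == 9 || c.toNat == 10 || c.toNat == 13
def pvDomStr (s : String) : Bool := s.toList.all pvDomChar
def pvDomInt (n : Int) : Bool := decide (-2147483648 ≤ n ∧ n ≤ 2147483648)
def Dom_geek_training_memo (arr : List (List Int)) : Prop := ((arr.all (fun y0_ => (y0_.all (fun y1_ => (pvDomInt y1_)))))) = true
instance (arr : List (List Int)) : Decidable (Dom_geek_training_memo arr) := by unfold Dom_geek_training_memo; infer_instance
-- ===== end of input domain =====

-- B replaces A's memoized (day,last) recursion by a forward DP over a single totals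
-- vector with its best/second-best entries, removing the inner scan per state (faster).

-- ===== PORT A =====
-- day-0 base case of Python's `check` (the loop over range(total_tasks) skipping `last`)
def aBase (arr : List (List Int)) (tasks last : Int) : Int :=
  (PySem.List.pyRange 0 tasks 1).foldl
    (fun maxi i => if i ≠ last then max maxi (PySem.List.pyGetD (PySem.List.pyGetD arr 0 []) i 0) else maxi) 0

-- Python's inner `check(day, last)` with the memo dict threaded through; `day` is the
-- Nat recursion depth (Python's nonnegative `day`), memo keys are Python's (day, last).
def aCheck (arr : List (List Int)) (tasks : Int) :
    Nat → Int → PySem.Dict (Int × Int) Int → Int × PySem.Dict (Int × Int) Int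
  | 0, last, memo => (aBase arr tasks last, memo)
  | d+1, last, memo =>
    match PySem.Dict.get? memo (((d : Int) + 1), last) with
    | some v => (v, memo)
    | none =>
      let st := (PySem.List.pyRange 0 tasks 1).foldl
        (fun (st : Int × PySem.Dict (Int × Int) Int) i =>
          if i ≠ last then
            let r := aCheck arr tasks d i st.2
            (max st.1 (PySem.List.pyGetD (PySem.List.pyGetD arr ((d : Int) + 1) []) i 0 + r.1), r.2)
          else st) ((0 : Int), memo)
      (st.1, PySem.Dict.insert st.2 (((d : Int) + 1), last) st.1)

def geek_training_memo (arr : List (List Int)) : Int :=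
  let total_days := arr.length
  let total_tasks := ((PySem.List.pyGetD arr 0 []).length : Int)
  (aCheck arr total_tasks (total_days - 1) total_tasks PySem.Dict.empty).1

-- ===== PORT B =====
-- best / second-best / index-of-best of p, folded over enumerate(p) starting from (0, 0, -1)
def bTop (p : List Int) : Int × Int × Int :=
  (PySem.List.enumerate p 0).foldl
    (fun (st : Int × Int × Int) iv =>
      if iv.2 > st.1 then (iv.2, st.1, iv.1)
      else if iv.2 > st.2.1 then (st.1, iv.2, st.2.2)
      else st) (0, 0, -1)

-- one day of B's forward DP: p ↦ [row[i] + (second if i == best_i else best)]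
def bStep (tasks : Int) (p row : List Int) : List Int :=
  let t := bTop p
  (PySem.List.pyRange 0 tasks 1).map
    (fun i => PySem.List.pyGetD row i 0 + (if i = t.2.2 then t.2.1 else t.1))

def geek_training_memo_alt (arr : List (List Int)) : Int :=
  let total_tasks := ((PySem.List.pyGetD arr 0 []).length : Int)
  let pfin := (PySem.List.slice arr (some 1) none).foldl
      (fun p row => bStep total_tasks p row) (PySem.List.pyGetD arr 0 [])
  pfin.foldl (fun ans v => max ans v) 0

-- ===== PRECONDITION & SPEC =====
-- Pre_ excludes the empty list and ragged inputs with a row shorter than the first row: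
-- Python A raises IndexError on these, except in the degenerate one-task case where A's
-- recursion never reads the short middle rows but B's full-row scan raises (see cites).
def Pre_geek_training_memo (arr : List (List Int)) : Prop :=
  arr ≠ [] ∧ ∀ row ∈ arr, (PySem.List.pyGetD arr 0 ([] : List Int)).length ≤ row.length
instance (arr : List (List Int)) : Decidable (Pre_geek_training_memo arr) := by
  unfold Pre_geek_training_memo; infer_instance

def pvWitness_geek_training_memo : List (List Int) := [[1, 2, 3], [3, 1, 1]]

def Spec_geek_training_memo (arr : List (List Int)) (out : Int) : Prop := out = geek_training_memo_alt arr
instance (arr : List (List Int)) (out : Int) : Decidable (Spec_geek_training_memo arr out) := by unfold Spec_geek_training_memo; infer_instance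

-- ===== CLAIM (what is proved, stated in full; the proofs are below) =====
def Claim_equal_geek_training_memo : Prop := ∀ (arr : List (List Int)), Dom_geek_training_memo arr → Pre_geek_training_memo arr → Spec_geek_training_memo arr (geek_training_memo arr)

-- ===== LEMMAS AND PROOFS =====

-- the first row and the task count, as both ports compute them
def arr0 (arr : List (List Int)) : List Int := PySem.List.pyGetD arr 0 []
def tks (arr : List (List Int)) : Int := ((arr0 arr).length : Int)

-- max over entries of q at indices ≠ last, clamped at 0 (what one `check` level computes)
def eMax (q : List Int) (last : Int) : Int :=
  (PySem.List.pyRange 0 (q.length : Int) 1).foldl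
    (fun maxi i => if i ≠ last then max maxi (PySem.List.pyGetD q i 0) else maxi) 0

-- the memo-free value of Python's check(day, last)
def F (arr : List (List Int)) : Nat → Int → Int
  | 0, last => aBase arr (tks arr) last
  | d+1, last => (PySem.List.pyRange 0 (tks arr) 1).foldl
      (fun maxi i => if i ≠ last then
          max maxi (PySem.List.pyGetD (PySem.List.pyGetD arr ((d : Int) + 1) []) i 0 + F arr d i)
        else maxi) 0

-- the totals vector after day d (B's `p`)
def Pvec (arr : List (List Int)) : Nat → List Int
  | 0 => arr0 arr
  | d+1 => (PySem.List.pyRange 0 (tks arr) 1).map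
      (fun i => PySem.List.pyGetD (PySem.List.pyGetD arr ((d : Int) + 1) []) i 0 + eMax (Pvec arr d) i)

def m0 (q : List Int) : Int := q.foldl (fun a v => max a v) 0

-- every memo entry is the memo-free value of check at its key
def MemoInv (arr : List (List Int)) (memo : PySem.Dict (Int × Int) Int) : Prop :=
  ∀ (d : Nat) (l v : Int), PySem.Dict.get? memo ((d : Int), l) = some v → v = F arr d l

theorem aCheck_eq (arr : List (List Int)) :
    ∀ (d : Nat) (last : Int) (memo : PySem.Dict (Int × Int) Int), MemoInv arr memo →
      (aCheck arr (tks arr) d last memo).1 = F arr d last ∧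
      MemoInv arr (aCheck arr (tks arr) d last memo).2 := by
  intro d
  induction d with
  | zero => intro last memo h; exact ⟨rfl, h⟩
  | succ d ih =>
    intro last memo h
    rw [aCheck]
    cases hm : PySem.Dict.get? memo (((d : Int) + 1), last) with
    | some v =>
      refine ⟨?_, h⟩
      exact h (d+1) last v (by push_cast; exact hm)
    | none =>
      have loop : ∀ (L : List Int) (acc : Int) (memo : PySem.Dict (Int × Int) Int),
          MemoInv arr memo →
          (L.foldl
            (fun (st : Int × PySem.Dict (Int × Int) Int) i =>
              if i ≠ last then
                let r := aCheck arr (tks arr) d i st.2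
                (max st.1 (PySem.List.pyGetD (PySem.List.pyGetD arr ((d : Int) + 1) []) i 0 + r.1), r.2)
              else st) (acc, memo)).1 =
            L.foldl (fun maxi i => if i ≠ last then
                max maxi (PySem.List.pyGetD (PySem.List.pyGetD arr ((d : Int) + 1) []) i 0 + F arr d i)
              else maxi) acc ∧
          MemoInv arr (L.foldl
            (fun (st : Int × PySem.Dict (Int × Int) Int) i =>
              if i ≠ last then
                let r := aCheck arr (tks arr) d i st.2
                (max st.1 (PySem.List.pyGetD (PySem.List.pyGetD arr ((d : Int) + 1) []) i 0 + r.1), r.2)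
              else st) (acc, memo)).2 := by
        intro L
        induction L with
        | nil => intro acc memo h; exact ⟨rfl, h⟩
        | cons i L ihL =>
          intro acc memo h
          simp only [List.foldl_cons]
          by_cases hi : i ≠ last
          · simp only [if_pos hi]
            obtain ⟨h1, h2⟩ := ih i memo h
            rw [h1]
            exact ihL _ _ h2
          · simp only [if_neg hi]
            exact ihL acc memo h
      obtain ⟨h1, h2⟩ := loop (PySem.List.pyRange 0 (tks arr) 1) 0 memo h
      constructor
      · rw [h1]; rfl
      · intro d' l v hg
        by_cases hk : ((d' : Int), l) = (((d : Int) + 1), last)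
        · rw [hk, PySem.Dict.get?_insert_self] at hg
          obtain ⟨hd, hl⟩ := Prod.mk.injEq .. ▸ hk
          have hd' : d' = d + 1 := by exact_mod_cast hd
          subst hd' hl
          rw [← Option.some_inj.mp hg, h1]
          rfl
        · rw [PySem.Dict.get?_insert_of_ne _ _ hk] at hg
          exact h2 d' l v hg

theorem enumerate_append_singleton (q : List Int) (v : Int) : ∀ s : Int,
    PySem.List.enumerate (q ++ [v]) s = PySem.List.enumerate q s ++ [(s + (q.length : Int), v)] := by
  induction q with
  | nil => intro s; simp [PySem.List.enumerate_nil, PySem.List.enumerate_cons]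
  | cons x q ih =>
    intro s
    simp only [List.cons_append, PySem.List.enumerate_cons, ih (s+1), List.length_cons]
    push_cast; ring_nf

theorem bTop_append (q : List Int) (v : Int) :
    bTop (q ++ [v]) =
      (if v > (bTop q).1 then (v, (bTop q).1, (q.length : Int))
       else if v > (bTop q).2.1 then ((bTop q).1, v, (bTop q).2.2)
       else bTop q) := by
  simp only [bTop, enumerate_append_singleton q v 0, List.foldl_append, List.foldl_cons, List.foldl_nil]
  norm_num

theorem eMax_append (q : List Int) (v i : Int) :
    eMax (q ++ [v]) i = if (q.length : Int) = i then eMax q i else max (eMax q i) v := by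
  simp only [eMax, List.length_append, List.length_cons, List.length_nil]
  have hcast : (((q.length + 1 : Nat)) : Int) = (q.length : Int) + 1 := by push_cast; ring
  rw [hcast, PySem.List.pyRange_one_succ_right (by positivity), List.foldl_append, List.foldl_cons, List.foldl_nil]
  have hcongr : ∀ (acc : Int), ∀ j ∈ PySem.List.pyRange 0 (q.length : Int) 1,
      (if j ≠ i then max acc (PySem.List.pyGetD (q ++ [v]) j 0) else acc)
      = (if j ≠ i then max acc (PySem.List.pyGetD q j 0) else acc) := by
    intro acc j hj
    rw [PySem.List.mem_pyRange_one] at hj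
    have : PySem.List.pyGetD (q ++ [v]) j 0 = PySem.List.pyGetD q j 0 := by
      rw [PySem.List.pyGetD_eq_getElem _ _ hj.1 (by simpa using by omega),
          PySem.List.pyGetD_eq_getElem _ _ hj.1 (by omega)]
      rw [List.getElem_append_left (by omega)]
    rw [this]
  rw [PySem.List.foldl_congr_mem _ _ _ _ hcongr]
  have hv : PySem.List.pyGetD (q ++ [v]) (q.length : Int) 0 = v := by
    rw [PySem.List.pyGetD_eq_getElem _ _ (by positivity) (by simp)]
    simp
  rw [hv]
  split_ifs with h1 h2 <;> simp_all


theorem eMax_out (q : List Int) (i : Int) (h : (q.length : Int) ≤ i ∨ i < 0) :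
    eMax q i = m0 q := by
  have hcongr : ∀ (acc : Int), ∀ j ∈ PySem.List.pyRange 0 (q.length : Int) 1,
      (if j ≠ i then max acc (PySem.List.pyGetD q j 0) else acc)
      = max acc (PySem.List.pyGetD q j 0) := by
    intro acc j hj
    rw [PySem.List.mem_pyRange_one] at hj
    rw [if_pos (by omega)]
  unfold eMax m0
  rw [PySem.List.foldl_congr_mem _ _ _ _ hcongr]
  exact PySem.List.foldl_pyRange_zero_pyGetD' q 0 (fun a v => max a v) 0

theorem bTop_inv (q : List Int) :
    (bTop q).1 = m0 q ∧ (bTop q).2.1 ≤ (bTop q).1 ∧ -1 ≤ (bTop q).2.2 ∧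
      (bTop q).2.2 < (q.length : Int) ∧
      ∀ i : Int, (if i = (bTop q).2.2 then (bTop q).2.1 else (bTop q).1) = eMax q i := by
  induction q using List.reverseRecOn with
  | nil =>
    refine ⟨rfl, le_refl _, by norm_num [bTop], by norm_num [bTop], ?_⟩
    intro i
    have h0 : eMax [] i = 0 := by simp [eMax, PySem.List.pyRange_one_eq_nil]
    rw [h0]
    by_cases hi : i = (bTop []).2.2 <;> simp [hi, bTop]
  | append_singleton q v ih =>
    obtain ⟨hb, hs, hlo, hhi, hall⟩ := ih
    have hm0 : m0 (q ++ [v]) = max (m0 q) v := by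
      unfold m0; rw [List.foldl_append]; rfl
    have hlen : (0:Int) ≤ (q.length : Int) := by positivity
    have hEout : eMax q (q.length : Int) = m0 q := eMax_out q _ (Or.inl le_rfl)
    rw [bTop_append]
    by_cases h1 : v > (bTop q).1
    · rw [if_pos h1]
      refine ⟨by rw [hm0, ← hb]; omega, by simp; omega, by show (-1:Int) ≤ (q.length : Int); omega, by push_cast [List.length_append, List.length_singleton]; omega, ?_⟩
      intro i
      rw [eMax_append]
      by_cases hi : i = (q.length : Int)
      · rw [if_pos (by simpa using hi), if_pos hi.symm, hi, hEout, hb]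
      · rw [if_neg (by simpa using hi), if_neg (fun hc => hi hc.symm)]
        have := hall i
        by_cases hbi : i = (bTop q).2.2
        · rw [if_pos hbi] at this; rw [← this]; omega
        · rw [if_neg hbi] at this; rw [← this]; omega
    · rw [if_neg h1]
      by_cases h2 : v > (bTop q).2.1
      · rw [if_pos h2]
        refine ⟨by rw [hm0, ← hb]; simp; omega, by simp; omega, by simpa using hlo, by push_cast [List.length_append, List.length_singleton]; omega, ?_⟩
        intro i
        rw [eMax_append]
        by_cases hi : i = (q.length : Int)
        · have hbi : ¬ i = (bTop q).2.2 := by omega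
          rw [if_neg (by simpa using hbi), if_pos hi.symm, hi, hEout, hb]
        · simp only
          by_cases hbi : i = (bTop q).2.2
          · rw [if_pos hbi, if_neg (fun hc => hi hc.symm)]
            have := hall i; rw [if_pos hbi] at this; rw [← this]; omega
          · rw [if_neg hbi, if_neg (fun hc => hi hc.symm)]
            have := hall i; rw [if_neg hbi] at this; rw [← this]; omega
      · rw [if_neg h2]
        refine ⟨by rw [hm0, ← hb]; omega, hs, hlo, by push_cast [List.length_append, List.length_singleton]; omega, ?_⟩
        intro i
        rw [eMax_append]
        by_cases hi : i = (q.length : Int)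
        · have hbi : ¬ i = (bTop q).2.2 := by omega
          rw [if_neg hbi, if_pos hi.symm, hi, hEout, hb]
        · by_cases hbi : i = (bTop q).2.2
          · rw [if_pos hbi, if_neg (fun hc => hi hc.symm)]
            have := hall i; rw [if_pos hbi] at this; rw [← this]; omega
          · rw [if_neg hbi, if_neg (fun hc => hi hc.symm)]
            have := hall i; rw [if_neg hbi] at this; rw [← this]; omega

theorem length_Pvec (arr : List (List Int)) : ∀ (d : Nat),
    (Pvec arr d).length = (arr0 arr).length := by
  intro d
  cases d with
  | zero => rfl
  | succ d =>
    simp [Pvec, PySem.List.length_pyRange_one, tks]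

theorem F_eq_eMax (arr : List (List Int)) :
    ∀ (d : Nat) (last : Int), F arr d last = eMax (Pvec arr d) last := by
  intro d
  induction d with
  | zero => intro last; rfl
  | succ d ih =>
    intro last
    have hlen : ((Pvec arr (d+1)).length : Int) = tks arr := by
      rw [length_Pvec]; rfl
    show (PySem.List.pyRange 0 (tks arr) 1).foldl _ 0 = _
    unfold eMax
    rw [hlen]
    apply PySem.List.foldl_congr_mem
    intro acc j hj
    rw [PySem.List.mem_pyRange_one] at hj
    have hget : PySem.List.pyGetD (Pvec arr (d+1)) j 0
        = PySem.List.pyGetD (PySem.List.pyGetD arr ((d : Int) + 1) []) j 0 + eMax (Pvec arr d) j := by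
      show PySem.List.pyGetD ((PySem.List.pyRange 0 (tks arr) 1).map _) j 0 = _
      rw [PySem.List.pyGetD_map_pyRange_of_nonneg _ _ _ _ hj.1 hj.2]
    rw [ih j, hget]

theorem Pvec_foldl (arr : List (List Int)) :
    ∀ (d : Nat), d < arr.length →
      Pvec arr d = ((arr.drop 1).take d).foldl (fun p row => bStep (tks arr) p row) (arr0 arr) := by
  have hbstep : ∀ (p row : List Int), bStep (tks arr) p row
      = (PySem.List.pyRange 0 (tks arr) 1).map
          (fun i => PySem.List.pyGetD row i 0 + eMax p i) := by
    intro p row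
    unfold bStep
    apply List.map_congr_left
    intro i _
    rw [(bTop_inv p).2.2.2.2 i]
  intro d
  induction d with
  | zero => intro _; rfl
  | succ d ih =>
    intro hd
    have hd' : d < (arr.drop 1).length := by simp; omega
    rw [List.take_add_one, List.getElem?_eq_getElem hd', List.foldl_append]
    rw [← ih (by omega)]
    simp only [Option.toList_some, List.foldl_cons, List.foldl_nil]
    rw [hbstep]
    conv_lhs => rw [Pvec]
    have h1 : (List.drop 1 arr)[d]'hd' = arr[1+d]'(by omega) := by rw [List.getElem_drop]
    have hc : ((d:Int) + 1) = (((1+d : Nat)) : Int) := by push_cast; ring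
    have h2 : PySem.List.pyGetD arr ((d:Int) + 1) [] = arr[1+d]'(by omega) := by
      rw [hc, PySem.List.pyGetD_natCast, List.getD_eq_getElem _ _ (by omega)]
    rw [h1, h2]

theorem final : ∀ (arr : List (List Int)), Pre_geek_training_memo arr →
    geek_training_memo arr = geek_training_memo_alt arr := by
  intro arr hpre
  obtain ⟨hne, -⟩ := hpre
  have hlen : 0 < arr.length := List.length_pos_of_ne_nil hne
  show (aCheck arr (tks arr) (arr.length - 1) (tks arr) PySem.Dict.empty).1
      = List.foldl (fun ans v => max ans v) 0
          (List.foldl (fun p row => bStep (tks arr) p row) (arr0 arr)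
            (PySem.List.slice arr (some 1) none))
  have hempty : MemoInv arr PySem.Dict.empty := by
    intro d l v hg
    simp [pysem] at hg
  have hA := (aCheck_eq arr (arr.length - 1) (tks arr) PySem.Dict.empty hempty).1
  rw [hA, F_eq_eMax]
  have hdrop : PySem.List.slice arr (some 1) none = arr.drop 1 := by
    rw [PySem.List.slice_from _ (by norm_num)]
    rfl
  rw [hdrop]
  have htake : arr.drop 1 = (arr.drop 1).take (arr.length - 1) := by
    rw [List.take_of_length_le (by simp)]
  rw [htake, ← Pvec_foldl arr (arr.length - 1) (by omega)]
  have hout : eMax (Pvec arr (arr.length - 1)) (tks arr)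
      = m0 (Pvec arr (arr.length - 1)) := by
    apply eMax_out
    left
    rw [length_Pvec]
    exact le_refl _
  exact hout

-- ===== VERDICT (by name: the statement is the Claim_ definition above) =====
theorem geek_training_memo_spec : Claim_equal_geek_training_memo := by
  intro arr _ hpre
  exact final arr hpre
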